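-- pv_equiv track=rewrite | github.com/cwb14/LTR_HARVEST_parallel | LTR_HARVEST_parallel2.py | map_coords_back
-- ===== SOURCE A (Python) =====
-- def map_coords_back(reverse_flag, len_chunk, coord_adj, coords):
--     # coords is an even-length list of positions (start,end, start,end, ...)
--     out = []
--     for i, val in enumerate(coords):
--         if reverse_flag == 0:
--             out.append(val + coord_adj)
--         else:
--             if i % 2 == 0:
--                 out.append(coord_adj + len_chunk - coords[i+1])
--             else:
--                 out.append(coord_adj + len_chunk - coords[i-1])
--     return out
-- ===== SOURCE B (Python) =====
-- def map_coords_back(reverse_flag, len_chunk, coord_adj, coords):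
--     # Staged whole-list version: no per-index branching. Forward case is a
--     # plain shift. Reverse case: strided slice assignments swap each
--     # (start,end) pair's endpoints in one shot, then a single affine map
--     # coord_adj + len_chunk - v produces the output.
--     if reverse_flag == 0:
--         return [v + coord_adj for v in coords]
--     swapped = [None] * len(coords)
--     swapped[0::2] = coords[1::2]
--     swapped[1::2] = coords[0::2]
--     return [coord_adj + len_chunk - v for v in swapped]
-- ===== Notes on version B (the rewrite author's own statement) =====
-- stated objective: alternative
-- what changed: Replaces the single enumerate loop with per-index parity branching by staged whole-list operations: in the reverse case two strided slice assignments swap each pair's endpoints at once, then one affine map coord_adj+len_chunk-v yields the result; the forward case is a hoisted plain shift.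
import Mathlib
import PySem

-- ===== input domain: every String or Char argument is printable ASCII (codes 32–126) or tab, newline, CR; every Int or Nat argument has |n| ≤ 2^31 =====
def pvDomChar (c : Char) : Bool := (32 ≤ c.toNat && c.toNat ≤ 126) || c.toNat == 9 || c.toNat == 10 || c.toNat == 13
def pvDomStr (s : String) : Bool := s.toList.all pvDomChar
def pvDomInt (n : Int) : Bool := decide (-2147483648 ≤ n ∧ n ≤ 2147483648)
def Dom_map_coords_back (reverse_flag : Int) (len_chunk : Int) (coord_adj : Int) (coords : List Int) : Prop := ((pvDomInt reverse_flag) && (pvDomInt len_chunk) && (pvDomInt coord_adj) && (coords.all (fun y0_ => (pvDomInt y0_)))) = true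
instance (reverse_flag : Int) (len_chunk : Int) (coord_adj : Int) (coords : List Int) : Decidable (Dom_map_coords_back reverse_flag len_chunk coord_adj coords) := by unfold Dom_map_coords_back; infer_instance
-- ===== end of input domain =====

-- B replaces the per-index parity loop by staged whole-list operations (strided-slice swap of
-- each pair's endpoints, then one affine map); objective: alternative. Return values only.

-- ===== PORT A =====
-- literal port of A: one loop over enumerate(coords) with per-element branching;
-- coords[i+1]/coords[i-1] via pyGetD (in range whenever A returns, i.e. under Pre_)
def map_coords_back (reverse_flag : Int) (len_chunk : Int) (coord_adj : Int) (coords : List Int) : List Int :=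
  (PySem.List.enumerate coords 0).foldl
    (fun out iv =>
      if reverse_flag = 0 then out ++ [iv.2 + coord_adj]
      else if iv.1 % 2 = 0 then out ++ [coord_adj + len_chunk - PySem.List.pyGetD coords (iv.1 + 1) 0]
      else out ++ [coord_adj + len_chunk - PySem.List.pyGetD coords (iv.1 - 1) 0]) []

-- ===== PORT B =====
-- l[0::2] / l[1::2] (odds via drop 1): the strided slices of Source B
def pvStride2 : List Int → List Int
  | [] => []
  | a :: rest => a :: pvStride2 (rest.drop 1)
  termination_by l => l.length
  decreasing_by simp

-- the two slice assignments swapped[0::2] = coords[1::2]; swapped[1::2] = coords[0::2]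
-- realised as the interleave of the two strided slices (exact for even length, the only
-- lengths Pre_ admits in the reverse case; Source B raises on odd length there, like A)
def pvInterleave : List Int → List Int → List Int
  | a :: as, b :: bs => a :: b :: pvInterleave as bs
  | _, _ => []

def map_coords_back_alt (reverse_flag : Int) (len_chunk : Int) (coord_adj : Int) (coords : List Int) : List Int :=
  if reverse_flag = 0 then coords.map (· + coord_adj)
  else (pvInterleave (pvStride2 (coords.drop 1)) (pvStride2 coords)).map
    (fun v => coord_adj + len_chunk - v)

-- ===== PRECONDITION & SPEC =====
-- Pre_ excludes only inputs where A RAISES (IndexError): reverse case with odd-length coords,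
-- where coords[i+1] runs off the end at the last pair start. B also raises there (ValueError).
def Pre_map_coords_back (reverse_flag : Int) (_len_chunk : Int) (_coord_adj : Int) (coords : List Int) : Prop :=
  reverse_flag = 0 ∨ coords.length % 2 = 0
instance (reverse_flag : Int) (len_chunk : Int) (coord_adj : Int) (coords : List Int) : Decidable (Pre_map_coords_back reverse_flag len_chunk coord_adj coords) := by unfold Pre_map_coords_back; infer_instance

def pvWitness_map_coords_back : Int × Int × Int × List Int := (1, 100, 5, [10, 20, 30, 40])

def Spec_map_coords_back (reverse_flag : Int) (len_chunk : Int) (coord_adj : Int) (coords : List Int) (out : List Int) : Prop := out = map_coords_back_alt reverse_flag len_chunk coord_adj coords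
instance (reverse_flag : Int) (len_chunk : Int) (coord_adj : Int) (coords : List Int) (out : List Int) : Decidable (Spec_map_coords_back reverse_flag len_chunk coord_adj coords out) := by unfold Spec_map_coords_back; infer_instance

-- ===== CLAIM (what is proved, stated in full; the proofs are below) =====
def Claim_equal_map_coords_back : Prop := ∀ (reverse_flag : Int) (len_chunk : Int) (coord_adj : Int) (coords : List Int), Dom_map_coords_back reverse_flag len_chunk coord_adj coords → Pre_map_coords_back reverse_flag len_chunk coord_adj coords → Spec_map_coords_back reverse_flag len_chunk coord_adj coords (map_coords_back reverse_flag len_chunk coord_adj coords)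

-- ===== LEMMAS AND PROOFS =====

-- proof-only intermediate form of the reverse output: one block (lc-b, lc-a) per pair
def pvPairRec (len_chunk coord_adj : Int) : List Int → List Int
  | a :: b :: rest => (coord_adj + len_chunk - b) :: (coord_adj + len_chunk - a) :: pvPairRec len_chunk coord_adj rest
  | _ => []

-- reverse case: A's fold over the suffix `suf` of coords (indices starting at pre.length, even)
-- produces exactly the pairwise form pvPairRec over suf, appended to the accumulator
theorem pv_rev_aux (len_chunk coord_adj : Int) :
    ∀ (suf pre acc : List Int), suf.length % 2 = 0 → pre.length % 2 = 0 →
    (PySem.List.enumerate suf (pre.length : Int)).foldl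
      (fun out iv =>
        if iv.1 % 2 = 0 then out ++ [coord_adj + len_chunk - PySem.List.pyGetD (pre ++ suf) (iv.1 + 1) 0]
        else out ++ [coord_adj + len_chunk - PySem.List.pyGetD (pre ++ suf) (iv.1 - 1) 0]) acc
    = acc ++ pvPairRec len_chunk coord_adj suf := by
  intro suf
  induction suf using pvPairRec.induct with
  | case1 a b rest ih =>
    intro pre acc hsuf hpre
    have h1 : ((pre.length : Int)) % 2 = 0 := by omega
    rw [PySem.List.enumerate_cons, PySem.List.enumerate_cons]
    simp only [List.foldl_cons]
    rw [if_pos h1, if_neg (by omega)]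
    have e1 : PySem.List.pyGetD (pre ++ a :: b :: rest) ((pre.length : Int) + 1) 0 = b := by
      have : ((pre.length : Int) + 1) = ((pre.length + 1 : Nat) : Int) := by omega
      rw [this, PySem.List.pyGetD_natCast]
      simp [List.getD]
    have e2 : PySem.List.pyGetD (pre ++ a :: b :: rest) ((pre.length : Int) + 1 - 1) 0 = a := by
      have : ((pre.length : Int) + 1 - 1) = ((pre.length : Nat) : Int) := by omega
      rw [this, PySem.List.pyGetD_natCast]
      simp [List.getD]
    rw [e1, e2]
    have hacc : acc ++ [coord_adj + len_chunk - b] ++ [coord_adj + len_chunk - a]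
        = acc ++ [coord_adj + len_chunk - b, coord_adj + len_chunk - a] := by simp
    rw [hacc]
    have hlist : pre ++ a :: b :: rest = (pre ++ [a, b]) ++ rest := by simp
    have hstart : (pre.length : Int) + 1 + 1 = ((pre ++ [a, b]).length : Nat) := by
      simp; omega
    rw [hlist, hstart, ih (pre ++ [a, b])
      (acc ++ [coord_adj + len_chunk - b, coord_adj + len_chunk - a]) (by simp at hsuf; omega) (by simp; omega)]
    simp [pvPairRec]
  | case2 l h1 =>
    intro pre acc hsuf hpre
    rcases l with _ | ⟨x, _ | ⟨y, r⟩⟩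
    · simp [PySem.List.enumerate_nil, pvPairRec]
    · simp at hsuf
    · exact absurd rfl (h1 x y r)

-- B's staged form (interleave of strided slices, then the affine map) equals pvPairRec on even length
theorem pv_staged_eq_pairRec (len_chunk coord_adj : Int) :
    ∀ (l : List Int), l.length % 2 = 0 →
    (pvInterleave (pvStride2 (l.drop 1)) (pvStride2 l)).map (fun v => coord_adj + len_chunk - v)
      = pvPairRec len_chunk coord_adj l := by
  intro l
  induction l using pvPairRec.induct with
  | case1 a b rest ih =>
    intro h
    have hlen : rest.length % 2 = 0 := by simp at h; omega
    simp only [List.drop_succ_cons, List.drop_zero, pvStride2, pvInterleave, List.map_cons, pvPairRec]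
    rw [ih hlen]
  | case2 l h1 =>
    intro hlen
    rcases l with _ | ⟨x, _ | ⟨y, r⟩⟩
    · simp [pvStride2, pvInterleave, pvPairRec]
    · simp at hlen
    · exact absurd rfl (h1 x y r)

theorem map_coords_back_spec_aux (reverse_flag len_chunk coord_adj : Int) (coords : List Int)
    (hpre : Pre_map_coords_back reverse_flag len_chunk coord_adj coords) :
    map_coords_back reverse_flag len_chunk coord_adj coords
      = map_coords_back_alt reverse_flag len_chunk coord_adj coords := by
  by_cases hrf : reverse_flag = 0
  · simp only [map_coords_back, map_coords_back_alt, hrf, if_true]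
    rw [PySem.List.foldl_append_singleton_eq_map]
    rw [show (fun iv : Int × Int => iv.2 + coord_adj) = ((· + coord_adj) ∘ (·.2)) from rfl,
      ← List.map_map, PySem.List.map_snd_enumerate]
    simp
  · have hev : coords.length % 2 = 0 := by
      rcases hpre with h | h
      · exact absurd h hrf
      · exact h
    simp only [map_coords_back, map_coords_back_alt, if_neg hrf]
    rw [pv_staged_eq_pairRec len_chunk coord_adj coords hev]
    have := pv_rev_aux len_chunk coord_adj coords [] [] hev (by simp)
    simpa using this

-- ===== VERDICT (by name: the statement is the Claim_ definition above) =====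
theorem map_coords_back_spec : Claim_equal_map_coords_back := by
  intro reverse_flag len_chunk coord_adj coords _ hpre
  exact map_coords_back_spec_aux reverse_flag len_chunk coord_adj coords hpre
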